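-- pv_equiv track=rewrite | github.com/jeffdshen/kaggle-public | daigt/ngram.py | concat_lines
-- ===== SOURCE A (Python) =====
-- def concat_lines(s: str, stop=".!?"):
--     lines = s.splitlines()
--     # assumes happens after character filtering
--     lines = [" ".join(line.split()) for line in lines]
--     lines = [
--         line if any(line.endswith(c) for c in stop) else line + " " for line in lines
--     ]
--     t = "\n\n".join(lines)
--     t = t.replace(" \n\n", " ")
--     return t
-- ===== SOURCE B (Python) =====
-- def concat_lines(s: str, stop=".!?"):
--     out = []
--     lines = s.splitlines()
--     n = len(lines)
--     stops = tuple(stop)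
--     for i, line in enumerate(lines):
--         t = " ".join(line.split())
--         has_stop = t.endswith(stops)
--         out.append(t)
--         if i < n - 1:
--             out.append("\n\n" if has_stop else " ")
--         elif not has_stop:
--             out.append(" ")
--     return "".join(out)
-- ===== Notes on version B (the rewrite author's own statement) =====
-- stated objective: alternative
-- what changed: B builds the output in a single pass over the lines, choosing each line's separator directly (a space when the line lacks a stop character, a blank-line separator otherwise), replacing A's three list comprehensions plus the global join-then-substring-replace trick.
import Mathlib
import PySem

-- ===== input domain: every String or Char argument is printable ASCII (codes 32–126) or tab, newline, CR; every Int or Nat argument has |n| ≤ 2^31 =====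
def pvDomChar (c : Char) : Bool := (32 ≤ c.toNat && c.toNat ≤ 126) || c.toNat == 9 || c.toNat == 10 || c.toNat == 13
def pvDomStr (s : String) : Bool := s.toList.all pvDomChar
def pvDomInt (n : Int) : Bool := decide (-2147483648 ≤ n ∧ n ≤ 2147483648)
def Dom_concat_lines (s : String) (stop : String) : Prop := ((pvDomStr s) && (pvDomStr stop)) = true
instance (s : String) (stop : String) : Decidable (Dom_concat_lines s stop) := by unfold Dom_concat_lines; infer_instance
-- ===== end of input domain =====

-- B re-implements A in one pass, choosing each line's separator directly (space vs blank line)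
-- instead of A's join-with-"\n\n" followed by the global " \n\n" -> " " replace; return values proved equal.

-- ===== PORT A =====
-- literal transliteration of A on the List Char side (PySem.Str.* are thin wrappers over PySem.Chars.*)
def concat_lines (s : String) (stop : String) : String :=
  let lines := PySem.Chars.splitlines s.toList
  let lines := lines.map (fun line => PySem.Chars.join [' '] (PySem.Chars.split₀ line))
  let lines := lines.map (fun line =>
    if stop.toList.any (fun c => PySem.Chars.endswith line [c]) then line else line ++ [' '])
  let t := PySem.Chars.join ['\n', '\n'] lines
  String.ofList (PySem.Chars.replace t [' ', '\n', '\n'] [' '])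

-- ===== PORT B =====
-- " ".join(line.split())
def pvNorm (line : List Char) : List Char :=
  PySem.Chars.join [' '] (PySem.Chars.split₀ line)

-- t.endswith(stops) where stops = tuple(stop)
def pvHasStop (stop t : List Char) : Bool :=
  stop.any (fun c => PySem.Chars.endswith t [c])

-- the loop of Source B: per line append the normalized text, then the chosen separator
def pvBuild (stop : List Char) : List (List Char) → List Char
  | [] => []
  | [line] =>
      let t := pvNorm line
      if pvHasStop stop t then t else t ++ [' ']
  | line :: rest =>
      let t := pvNorm line
      (t ++ (if pvHasStop stop t then ['\n', '\n'] else [' '])) ++ pvBuild stop rest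

def concat_lines_alt (s : String) (stop : String) : String :=
  String.ofList (pvBuild stop.toList (PySem.Chars.splitlines s.toList))

-- ===== PRECONDITION & SPEC =====
def Spec_concat_lines (s : String) (stop : String) (out : String) : Prop := out = concat_lines_alt s stop
instance (s : String) (stop : String) (out : String) : Decidable (Spec_concat_lines s stop out) := by unfold Spec_concat_lines; infer_instance

-- ===== CLAIM (what is proved, stated in full; the proofs are below) =====
def Claim_equal_concat_lines : Prop := ∀ (s : String) (stop : String), Dom_concat_lines s stop → Spec_concat_lines s stop (concat_lines s stop)

-- ===== LEMMAS AND PROOFS =====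

-- total one-pass form of A's t.replace(" \n\n", " ")
def pvRepl : List Char → List Char
  | ' ' :: '\n' :: '\n' :: t => ' ' :: pvRepl t
  | c :: t => c :: pvRepl t
  | [] => []

theorem pvRepl_nil : pvRepl [] = [] := rfl

theorem pvRepl_cons (c : Char) (t : List Char) (h : ¬ (c = ' ' ∧ t.take 2 = ['\n', '\n'])) :
    pvRepl (c :: t) = c :: pvRepl t := by
  rw [pvRepl.eq_def]
  split
  · rename_i t' heq
    injection heq with h1 h2
    exact absurd ⟨h1, by rw [h2]; rfl⟩ h
  · rename_i c' t' heq
    injection heq with h1 h2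
    rw [h1, h2]
  · rename_i heq; cases heq

-- the fuelled replace.go equals pvRepl once the fuel covers the string
theorem pvGo_eq_repl (fuel : Nat) (l acc : List Char) (h : l.length ≤ fuel) :
    PySem.Chars.replace.go [' ', '\n', '\n'] [' '] fuel l acc = acc.reverse ++ pvRepl l := by
  induction fuel generalizing l acc with
  | zero =>
    have : l = [] := List.eq_nil_of_length_eq_zero (Nat.le_zero.mp h)
    subst this
    simp [PySem.Chars.replace.go, pvRepl]
  | succ fuel ih =>
    match l, h with
    | [], _ => simp [PySem.Chars.replace.go, pvRepl]
    | c :: t, h =>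
      rw [PySem.Chars.replace.go]
      by_cases hp : [' ', '\n', '\n'].isPrefixOf (c :: t) = true
      · rw [if_pos hp]
        obtain ⟨u, hu⟩ := List.isPrefixOf_iff_prefix.mp hp
        have hct : c :: t = ' ' :: '\n' :: '\n' :: u := hu.symm
        have hlen : u.length ≤ fuel := by
          have := congrArg List.length hct
          simp only [List.length_cons] at this h
          omega
        rw [hct]
        simp only [List.length_cons, List.length_nil, List.drop_succ_cons, List.drop]
        rw [ih u ([' '].reverse ++ acc) hlen]
        rw [show pvRepl (' ' :: '\n' :: '\n' :: u) = ' ' :: pvRepl u from rfl]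
        simp
      · rw [if_neg hp]
        rw [ih t (c :: acc) (by simpa using h)]
        rw [pvRepl_cons c t]
        · simp
        · rintro ⟨rfl, ht⟩
          apply hp
          cases t with
          | nil => simp at ht
          | cons d t' => cases t' with
            | nil => simp at ht
            | cons e t'' =>
              simp at ht
              simp [List.isPrefixOf, ht.1, ht.2]

theorem pvReplace_eq_repl (t : List Char) :
    PySem.Chars.replace t [' ', '\n', '\n'] [' '] = pvRepl t := by
  rw [PySem.Chars.replace]
  rw [if_neg (by simp)]
  simpa using pvGo_eq_repl t.length t [] le_rfl

-- pvRepl passes over a segment with no '\n' that creates no boundary match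
theorem pvRepl_append (u v : List Char) (hn : ∀ c ∈ u, c ≠ '\n')
    (hb : u.getLast? = some ' ' → v.head? ≠ some '\n') :
    pvRepl (u ++ v) = u ++ pvRepl v := by
  induction u with
  | nil => simp
  | cons c u' ih =>
    rw [List.cons_append, pvRepl_cons]
    · have hb' : u'.getLast? = some ' ' → v.head? ≠ some '\n' := by
        intro hl
        apply hb
        cases u' with
        | nil => simp at hl
        | cons d u'' => rwa [List.getLast?_cons_cons]
      rw [ih (fun x hx => hn x (List.mem_cons_of_mem _ hx)) hb']
      simp
    · rintro ⟨rfl, ht⟩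
      cases u' with
      | nil =>
        simp only [List.nil_append] at ht
        have hv : v.head? = some '\n' := by
          cases v with
          | nil => simp at ht
          | cons a v' => simp_all
        exact hb (by simp) hv
      | cons d u'' =>
        have : d = '\n' := by
          simp only [List.cons_append, List.take] at ht
          cases u'' <;> simp_all
        exact hn d (by simp [this]) this

-- line.split() words are nonempty and contain no whitespace
theorem pvSplit₀_go_words (l cur : List Char) (acc : List (List Char))
    (hc : ∀ c ∈ cur, PySem.Chars.isspace c = false)
    (ha : ∀ w ∈ acc, w ≠ [] ∧ ∀ c ∈ w, PySem.Chars.isspace c = false) :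
    ∀ w ∈ PySem.Chars.split₀.go l cur acc, w ≠ [] ∧ ∀ c ∈ w, PySem.Chars.isspace c = false := by
  induction l generalizing cur acc with
  | nil =>
    rw [PySem.Chars.split₀.go]
    split
    · intro w hw
      exact ha w (by simpa using hw)
    · rename_i hne
      intro w hw
      simp only [List.mem_reverse, List.mem_cons] at hw
      rcases hw with rfl | hw
      · refine ⟨by simpa using hne, ?_⟩
        intro c hc'
        exact hc c (by simpa using hc')
      · exact ha w hw
  | cons c t ih =>
    rw [PySem.Chars.split₀.go]
    by_cases hs : PySem.Chars.isspace c = true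
    · rw [if_pos hs]
      by_cases he : cur.isEmpty = true
      · rw [if_pos he]
        exact ih [] acc (by simp) ha
      · rw [if_neg he]
        refine ih [] _ (by simp) ?_
        intro w hw
        simp only [List.mem_cons] at hw
        rcases hw with rfl | hw
        · refine ⟨by simpa using he, fun c' hc' => hc c' (by simpa using hc')⟩
        · exact ha w hw
    · rw [if_neg hs]
      refine ih (c :: cur) acc ?_ ha
      intro c' hc'
      rcases List.mem_cons.mp hc' with rfl | h
      · simpa using hs
      · exact hc c' h

theorem pvSplit₀_words (l : List Char) :
    ∀ w ∈ PySem.Chars.split₀ l, w ≠ [] ∧ ∀ c ∈ w, PySem.Chars.isspace c = false := by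
  rw [PySem.Chars.split₀]
  exact pvSplit₀_go_words l [] [] (by simp) (by simp)

-- " ".join of nonempty whitespace-free words: no '\n', never ends with ' '
theorem pvJoin_good (ws : List (List Char))
    (h : ∀ w ∈ ws, w ≠ [] ∧ ∀ c ∈ w, PySem.Chars.isspace c = false) :
    (∀ c ∈ PySem.Chars.join [' '] ws, c ≠ '\n') ∧
      (PySem.Chars.join [' '] ws).getLast? ≠ some ' ' := by
  induction ws with
  | nil => simp [PySem.Chars.join_nil]
  | cons w ws ih =>
    have hw := h w (by simp)
    have hlast : ∀ t : List Char, t ≠ [] → (∀ c ∈ t, PySem.Chars.isspace c = false) →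
        t.getLast? ≠ some ' ' := by
      intro t ht hns hl
      have hmem : t.getLast ht ∈ t := List.getLast_mem ht
      rw [List.getLast?_eq_some_getLast ht] at hl
      have h2 : t.getLast ht = ' ' := Option.some_inj.mp hl
      have := hns _ hmem
      rw [h2] at this
      exact absurd this (by decide)
    have hnc : ∀ c ∈ w, c ≠ '\n' := by
      intro c hc rfl
      have := hw.2 _ hc
      exact absurd this (by decide)
    cases ws with
    | nil =>
      rw [PySem.Chars.join_singleton]
      exact ⟨hnc, hlast w hw.1 hw.2⟩
    | cons w' ws' =>
      have ih' := ih (fun x hx => h x (by simp [hx]))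
      rw [PySem.Chars.join_cons_cons]
      have hjne : PySem.Chars.join [' '] (w' :: ws') ≠ [] := by
        have hw' := (h w' (by simp)).1
        cases ws' with
        | nil => rwa [PySem.Chars.join_singleton]
        | cons w'' ws'' =>
          rw [PySem.Chars.join_cons_cons]
          simp [hw']
      constructor
      · intro c hc
        simp only [List.mem_append, List.mem_cons] at hc
        rcases hc with hc | hc
        · rcases hc with hc | hc
          · exact hnc c hc
          · simp at hc; subst hc; decide
        · exact ih'.1 c hc
      · rw [List.getLast?_append_of_ne_nil _ hjne]
        exact ih'.2

-- normalized lines: no '\n', never end with ' '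
theorem pvNorm_good (l : List Char) :
    (∀ c ∈ pvNorm l, c ≠ '\n') ∧ (pvNorm l).getLast? ≠ some ' ' := by
  exact pvJoin_good _ (pvSplit₀_words l)

-- main loop invariant: A's replace-of-join equals B's direct build
theorem pvMain (stop : List Char) (lines : List (List Char)) :
    pvRepl (PySem.Chars.join ['\n', '\n'] (lines.map (fun l =>
      if pvHasStop stop (pvNorm l) then pvNorm l else pvNorm l ++ [' ']))) = pvBuild stop lines := by
  induction lines with
  | nil => simp [PySem.Chars.join_nil, pvBuild, pvRepl]
  | cons l lines ih =>
    obtain ⟨hn, hl⟩ := pvNorm_good l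
    have hn' : ∀ c ∈ pvNorm l ++ [' '], c ≠ '\n' := by
      intro c hc
      rcases List.mem_append.mp hc with h | h
      · exact hn c h
      · simp at h; subst h; decide
    cases lines with
    | nil =>
      simp only [List.map_cons, List.map_nil, PySem.Chars.join_singleton]
      rw [show pvBuild stop [l] = if pvHasStop stop (pvNorm l) then pvNorm l else pvNorm l ++ [' '] from rfl]
      by_cases hf : pvHasStop stop (pvNorm l) = true
      · rw [if_pos hf]
        simpa [pvRepl_nil] using pvRepl_append (pvNorm l) [] hn (by simp)
      · rw [if_neg hf]
        simpa [pvRepl_nil] using pvRepl_append (pvNorm l ++ [' ']) [] hn' (by simp)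
    | cons l' rest =>
      simp only [List.map_cons, PySem.Chars.join_cons_cons]
      rw [show pvBuild stop (l :: l' :: rest) =
        (pvNorm l ++ (if pvHasStop stop (pvNorm l) then ['\n', '\n'] else [' '])) ++
          pvBuild stop (l' :: rest) from rfl]
      simp only [List.map_cons] at ih
      rw [← ih]
      set J := PySem.Chars.join ['\n', '\n']
        ((if pvHasStop stop (pvNorm l') = true then pvNorm l' else pvNorm l' ++ [' ']) ::
          List.map (fun l => if pvHasStop stop (pvNorm l) = true then pvNorm l else pvNorm l ++ [' ']) rest)
        with hJ
      by_cases hf : pvHasStop stop (pvNorm l) = true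
      · rw [if_pos hf, if_pos hf]
        rw [List.append_assoc]
        simp only [List.cons_append, List.nil_append]
        rw [pvRepl_append (pvNorm l) ('\n' :: '\n' :: J) hn (fun h => absurd h hl)]
        rw [pvRepl_cons '\n' ('\n' :: J) (by rintro ⟨h, -⟩; exact absurd h (by decide)),
            pvRepl_cons '\n' J (by rintro ⟨h, -⟩; exact absurd h (by decide))]
        simp
      · rw [if_neg hf, if_neg hf]
        rw [List.append_assoc, List.append_assoc]
        simp only [List.cons_append, List.nil_append]
        rw [pvRepl_append (pvNorm l) (' ' :: '\n' :: '\n' :: J) hn (fun _ => by simp)]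
        rw [show pvRepl (' ' :: '\n' :: '\n' :: J) = ' ' :: pvRepl J from rfl]
        simp

-- ===== VERDICT (by name: the statement is the Claim_ definition above) =====
theorem concat_lines_spec : Claim_equal_concat_lines := by
  intro s stop _
  show concat_lines s stop = concat_lines_alt s stop
  unfold concat_lines concat_lines_alt
  simp only [List.map_map]
  rw [pvReplace_eq_repl]
  exact congrArg String.ofList (pvMain stop.toList (PySem.Chars.splitlines s.toList))
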